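-- pv_equiv track=rewrite | github.com/c-danil0o/jobshop-evo | main.py | get_dependent_op
-- ===== SOURCE A (Python) =====
-- NUM_OF_OPERATIONS_I = [10, 10, 10, 10, 10, 10, 10, 10, 10, 10]
--
-- def get_job(operation):
--     job = 1
--     s = 0
--     for job_op in NUM_OF_OPERATIONS_I:
--         s += job_op
--         if operation <= s:
--             return job
--         job += 1
--     return job
--
-- def get_dependent_op(operation):
--     job = get_job(operation)
--     start_point = 1
--     for ops in range(job - 1):
--         start_point += NUM_OF_OPERATIONS_I[ops]
--
--     if operation == start_point:
--         return 0
--     else: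
--         return operation - 1
-- ===== SOURCE B (Python) =====
-- NUM_OF_OPERATIONS_I = [10, 10, 10, 10, 10, 10, 10, 10, 10, 10]
--
-- def get_dependent_op(operation):
--     start_point = 1
--     for size in NUM_OF_OPERATIONS_I:
--         if operation <= start_point + size - 1:
--             break
--         start_point += size
--     return 0 if operation == start_point else operation - 1
-- ===== Notes on version B (the rewrite author's own statement) =====
-- stated objective: simpler
-- what changed: Single loop tracking the current job's first operation index (start_point) with an early break, dropping the get_job helper and the second prefix-sum loop over range(job-1).
import Mathlib
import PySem

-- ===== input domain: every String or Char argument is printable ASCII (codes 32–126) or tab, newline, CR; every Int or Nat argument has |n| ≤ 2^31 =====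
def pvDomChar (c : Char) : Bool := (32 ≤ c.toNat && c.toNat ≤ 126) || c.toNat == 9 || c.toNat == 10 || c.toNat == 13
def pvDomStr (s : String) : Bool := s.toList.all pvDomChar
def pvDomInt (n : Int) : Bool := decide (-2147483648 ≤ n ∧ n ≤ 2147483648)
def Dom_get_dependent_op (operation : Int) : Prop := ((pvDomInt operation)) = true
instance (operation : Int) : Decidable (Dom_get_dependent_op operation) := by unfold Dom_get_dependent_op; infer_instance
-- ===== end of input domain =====

-- B replaces A's two passes (get_job, then a second prefix-sum loop over range(job-1)) by a
-- single loop that maintains the current job's first operation index; objective: simpler.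

-- ===== PORT A =====
def NUM_OF_OPERATIONS_I : List Int := [10, 10, 10, 10, 10, 10, 10, 10, 10, 10]

-- the for-loop of get_job with state (job, s); early 'return job' when operation <= s
def get_job_loop (operation : Int) (job : Int) (s : Int) : List Int → Int
  | [] => job
  | job_op :: rest =>
    if operation ≤ s + job_op then job
    else get_job_loop operation (job + 1) (s + job_op) rest

def get_job (operation : Int) : Int := get_job_loop operation 1 0 NUM_OF_OPERATIONS_I

def get_dependent_op (operation : Int) : Int :=
  let job := get_job operation
  -- NUM_OF_OPERATIONS_I[ops]: ops ranges over 0..job-2 with job ≤ 11, always in range,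
  -- so the IndexError branch is unreachable and the total pyGetD is exact here.
  let start_point := (PySem.List.pyRange 0 (job - 1) 1).foldl
    (fun sp ops => sp + PySem.List.pyGetD NUM_OF_OPERATIONS_I ops 0) 1
  if operation = start_point then 0 else operation - 1

-- ===== PORT B =====
-- B's single loop: walks the sizes keeping start_point, breaking at the current job
def alt_loop (operation : Int) (start_point : Int) : List Int → Int
  | [] => start_point
  | size :: rest =>
    if operation ≤ start_point + size - 1 then start_point
    else alt_loop operation (start_point + size) rest

def get_dependent_op_alt (operation : Int) : Int :=
  let start_point := alt_loop operation 1 NUM_OF_OPERATIONS_I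
  if operation = start_point then 0 else operation - 1

-- ===== PRECONDITION & SPEC =====
def Spec_get_dependent_op (operation : Int) (out : Int) : Prop := out = get_dependent_op_alt operation
instance (operation : Int) (out : Int) : Decidable (Spec_get_dependent_op operation out) := by unfold Spec_get_dependent_op; infer_instance

-- ===== CLAIM (what is proved, stated in full; the proofs are below) =====
def Claim_equal_get_dependent_op : Prop := ∀ (operation : Int), Dom_get_dependent_op operation → Spec_get_dependent_op operation (get_dependent_op operation)

-- ===== LEMMAS AND PROOFS =====

-- sum of the first k elements of a list (proof-side helper)
def sumFirst : List Int → Nat → Int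
  | _, 0 => 0
  | [], _ + 1 => 0
  | x :: xs, k + 1 => x + sumFirst xs k

theorem le_get_job_loop (op j s : Int) (l : List Int) : j ≤ get_job_loop op j s l := by
  induction l generalizing j s with
  | nil => simp [get_job_loop]
  | cons x xs ih =>
    simp only [get_job_loop]
    split_ifs
    · exact le_refl j
    · have := ih (j + 1) (s + x); omega

theorem get_job_loop_le (op j s : Int) (l : List Int) :
    get_job_loop op j s l ≤ j + l.length := by
  induction l generalizing j s with
  | nil => simp [get_job_loop]
  | cons x xs ih =>
    simp only [get_job_loop, List.length_cons]
    split_ifs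
    · omega
    · have := ih (j + 1) (s + x); omega

-- B's loop equals s+1 plus the sum of the sizes of the jobs before the job A's get_job finds
theorem alt_loop_eq (op : Int) (l : List Int) : ∀ (j s : Int),
    alt_loop op (s + 1) l = s + 1 + sumFirst l ((get_job_loop op j s l) - j).toNat := by
  induction l with
  | nil => intro j s; simp [alt_loop, get_job_loop, sumFirst]
  | cons x xs ih =>
    intro j s
    simp only [alt_loop, get_job_loop]
    by_cases h : op ≤ s + x
    · rw [if_pos (by omega : op ≤ s + 1 + x - 1), if_pos h]
      simp [sumFirst]
    · rw [if_neg (by omega : ¬ op ≤ s + 1 + x - 1), if_neg h]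
      have h2 : s + 1 + x = (s + x) + 1 := by ring
      rw [h2, ih (j + 1) (s + x)]
      have hge := le_get_job_loop op (j + 1) (s + x) xs
      have hto : ((get_job_loop op (j + 1) (s + x) xs) - j).toNat
          = ((get_job_loop op (j + 1) (s + x) xs) - (j + 1)).toNat + 1 := by omega
      rw [hto]
      simp only [sumFirst]
      ring

theorem sumFirst_succ (xs : List Int) : ∀ (m : Nat), m < xs.length →
    sumFirst xs (m + 1) = sumFirst xs m + xs.getD m 0 := by
  induction xs with
  | nil => intro m h; simp at h
  | cons x l ih =>
    intro m h
    cases m with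
    | zero => simp [sumFirst]
    | succ k =>
      simp only [sumFirst, List.getD_cons_succ]
      rw [ih k (by simpa using h)]
      ring

-- A's second loop (prefix sum via indexing) equals 1 + sumFirst
theorem foldl_sp (xs : List Int) : ∀ (m : Nat), m ≤ xs.length →
    (PySem.List.pyRange 0 (m : Int) 1).foldl
      (fun sp ops => sp + PySem.List.pyGetD xs ops 0) 1 = 1 + sumFirst xs m := by
  intro m
  induction m with
  | zero =>
    intro _
    simp only [Nat.cast_zero]
    rw [PySem.List.pyRange_one_eq_nil le_rfl]
    simp [sumFirst]
  | succ k ih =>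
    intro h
    have hc : ((k + 1 : Nat) : Int) = (k : Int) + 1 := by push_cast; ring
    rw [hc, PySem.List.pyRange_one_succ_right (by positivity), List.foldl_append, ih (by omega)]
    simp only [List.foldl]
    rw [PySem.List.pyGetD_natCast, sumFirst_succ xs k (by omega)]
    ring

theorem ports_agree (op : Int) : get_dependent_op op = get_dependent_op_alt op := by
  simp only [get_dependent_op, get_dependent_op_alt, get_job]
  have h2 := get_job_loop_le op 1 0 NUM_OF_OPERATIONS_I
  have hlen : (get_job_loop op 1 0 NUM_OF_OPERATIONS_I - 1).toNat ≤ NUM_OF_OPERATIONS_I.length := by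
    simp only [NUM_OF_OPERATIONS_I, List.length_cons, List.length_nil] at h2 ⊢
    omega
  have h1 := le_get_job_loop op 1 0 NUM_OF_OPERATIONS_I
  have hm : get_job_loop op 1 0 NUM_OF_OPERATIONS_I - 1
      = (((get_job_loop op 1 0 NUM_OF_OPERATIONS_I - 1).toNat : Nat) : Int) := by omega
  have hfold : List.foldl (fun sp ops => sp + PySem.List.pyGetD NUM_OF_OPERATIONS_I ops 0) 1
      (PySem.List.pyRange 0 (get_job_loop op 1 0 NUM_OF_OPERATIONS_I - 1) 1)
      = 1 + sumFirst NUM_OF_OPERATIONS_I ((get_job_loop op 1 0 NUM_OF_OPERATIONS_I - 1).toNat) := by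
    rw [hm, Int.toNat_natCast]
    exact foldl_sp _ _ hlen
  have hb : alt_loop op 1 NUM_OF_OPERATIONS_I
      = 1 + sumFirst NUM_OF_OPERATIONS_I ((get_job_loop op 1 0 NUM_OF_OPERATIONS_I - 1).toNat) := by
    have h := alt_loop_eq op NUM_OF_OPERATIONS_I 1 0
    simp only [zero_add] at h
    exact h
  simp only [hfold, hb]

-- ===== VERDICT (by name: the statement is the Claim_ definition above) =====
theorem get_dependent_op_spec : Claim_equal_get_dependent_op := by
  intro op _
  unfold Spec_get_dependent_op
  exact ports_agree op
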